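-- pv_equiv track=rewrite | github.com/jayamurli1954/MandirMitra | backend/link_categories_to_accounts.py | find_best_match
-- ===== SOURCE A (Python) =====
-- def find_best_match(name: str, mapping: dict) -> str:
--     """Find best matching account code for a category name"""
--     name_lower = name.lower()
--
--     # Try exact match first
--     for key, code in mapping.items():
--         if key.lower() == name_lower:
--             return code
--
--     # Try partial match
--     for key, code in mapping.items():
--         if key.lower() in name_lower or name_lower in key.lower():
--             return code
--
--     return None
-- ===== SOURCE B (Python) =====
-- def find_best_match(name: str, mapping: dict) -> str:
--     """Single pass: exact match returns immediately; first partial match is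
--     remembered and returned only if no exact match exists anywhere."""
--     name_lower = name.lower()
--     partial = None
--     for key, code in mapping.items():
--         key_lower = key.lower()
--         if key_lower == name_lower:
--             return code
--         if partial is None and (key_lower in name_lower or name_lower in key_lower):
--             partial = code
--     return partial
-- ===== Notes on version B (the rewrite author's own statement) =====
-- stated objective: alternative
-- what changed: Replaces A's two sequential scans of the dict (exact-match pass, then partial-match pass) by a single pass that returns on an exact match and remembers only the first partial match.
import Mathlib
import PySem

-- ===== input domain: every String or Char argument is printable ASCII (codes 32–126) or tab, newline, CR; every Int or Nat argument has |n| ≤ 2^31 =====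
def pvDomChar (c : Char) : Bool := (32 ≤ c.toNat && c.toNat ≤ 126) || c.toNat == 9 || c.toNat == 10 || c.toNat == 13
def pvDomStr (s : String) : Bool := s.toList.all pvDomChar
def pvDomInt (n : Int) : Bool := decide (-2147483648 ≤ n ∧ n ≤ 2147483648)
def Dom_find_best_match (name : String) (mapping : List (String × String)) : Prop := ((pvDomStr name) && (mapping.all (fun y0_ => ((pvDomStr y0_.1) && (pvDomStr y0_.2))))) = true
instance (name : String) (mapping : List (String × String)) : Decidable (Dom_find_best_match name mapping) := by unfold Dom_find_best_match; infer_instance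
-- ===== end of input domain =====

-- B merges A's two scans of the dict into one pass with priority state (exact match returns
-- immediately, first partial match is remembered); equal return values proved.

-- ===== PORT A =====
-- first loop of A: 'for key, code in mapping.items(): if key.lower() == name_lower: return code'
def fbmExactLoop (nl : String) : List (String × String) → Option String
  | [] => none
  | (key, code) :: rest =>
    if PySem.Str.lower key = nl then some code else fbmExactLoop nl rest

-- second loop of A: 'if key.lower() in name_lower or name_lower in key.lower(): return code'
def fbmPartialLoop (nl : String) : List (String × String) → Option String
  | [] => none
  | (key, code) :: rest =>
    if PySem.Str.isIn (PySem.Str.lower key) nl || PySem.Str.isIn nl (PySem.Str.lower key) then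
      some code
    else fbmPartialLoop nl rest

def find_best_match (name : String) (mapping : List (String × String)) : Option String :=
  let name_lower := PySem.Str.lower name
  match fbmExactLoop name_lower mapping with
  | some code => some code
  | none =>
    match fbmPartialLoop name_lower mapping with
    | some code => some code
    | none => none

-- ===== PORT B =====
-- B's single loop, carrying the 'partial' variable
def fbmAltLoop (nl : String) : List (String × String) → Option String → Option String
  | [], partial_ => partial_
  | (key, code) :: rest, partial_ =>
    let kl := PySem.Str.lower key
    if kl = nl then some code
    else if partial_.isNone && (PySem.Str.isIn kl nl || PySem.Str.isIn nl kl) then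
      fbmAltLoop nl rest (some code)
    else
      fbmAltLoop nl rest partial_

def find_best_match_alt (name : String) (mapping : List (String × String)) : Option String :=
  fbmAltLoop (PySem.Str.lower name) mapping none

-- ===== PRECONDITION & SPEC =====
def Spec_find_best_match (name : String) (mapping : List (String × String)) (out : Option String) : Prop := out = find_best_match_alt name mapping
instance (name : String) (mapping : List (String × String)) (out : Option String) : Decidable (Spec_find_best_match name mapping out) := by unfold Spec_find_best_match; infer_instance

-- ===== CLAIM (what is proved, stated in full; the proofs are below) =====
def Claim_equal_find_best_match : Prop := ∀ (name : String) (mapping : List (String × String)), Dom_find_best_match name mapping → Spec_find_best_match name mapping (find_best_match name mapping)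

-- ===== LEMMAS AND PROOFS =====

-- B's loop equals: exact scan first; else the already-recorded partial; else A's partial scan.
theorem fbmAltLoop_eq (nl : String) (l : List (String × String)) (p : Option String) :
    fbmAltLoop nl l p =
      match fbmExactLoop nl l with
      | some c => some c
      | none => match p with
        | some q => some q
        | none => fbmPartialLoop nl l := by
  induction l generalizing p with
  | nil => cases p <;> simp [fbmAltLoop, fbmExactLoop, fbmPartialLoop]
  | cons hd tl ih =>
    obtain ⟨key, code⟩ := hd
    simp only [fbmAltLoop, fbmExactLoop, fbmPartialLoop]
    by_cases hex : PySem.Str.lower key = nl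
    · simp [hex]
    · simp only [hex, if_false]
      by_cases h1 : PySem.Chars.isIn (PySem.Chars.lower key.toList) nl.toList = true
      · cases p with
        | none => simp [h1, ih]
        | some q => simp [h1, ih]
      · by_cases h2 : PySem.Chars.isIn nl.toList (PySem.Chars.lower key.toList) = true
        · cases p with
          | none => simp [h1, h2, ih]
          | some q => simp [h1, h2, ih]
        · cases p with
          | none => simp [h1, h2, ih]
          | some q => simp [h1, h2, ih]

-- ===== VERDICT (by name: the statement is the Claim_ definition above) =====
theorem find_best_match_spec : Claim_equal_find_best_match := by
  intro name mapping _
  unfold Spec_find_best_match find_best_match find_best_match_alt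
  rw [fbmAltLoop_eq]
  cases he : fbmExactLoop (PySem.Str.lower name) mapping <;>
    cases hp : fbmPartialLoop (PySem.Str.lower name) mapping <;> simp [he, hp]
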